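-- pv_equiv track=rewrite | github.com/adrian0398/Introytaller2018 | Código/Recursión de pila/Numeros_menores_cuatro.py | numeros_menores_cuatro
-- ===== SOURCE A (Python) =====
-- def numeros_menores_cuatro(num):
--   if(num==0): #Condicion de parada
--      return True
--   else:
--     if (num%10>=0) and (num%10<=4):
--       return numeros_menores_cuatro(num // 10)
--     else:
--       return False
-- ===== SOURCE B (Python) =====
-- def numeros_menores_cuatro(num):
--     if num < 0:
--         return False
--     while num > 0:
--         if num % 10 > 4:
--             return False
--         num //= 10
--     return True
-- ===== Notes on version B (the rewrite author's own statement) =====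
-- stated objective: simpler
-- what changed: Replaces the recursion (which on negatives spirals through floor-division until it hits remainder 9) with an early negative check plus an iterative digit loop over a nonnegative number.
import Mathlib
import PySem

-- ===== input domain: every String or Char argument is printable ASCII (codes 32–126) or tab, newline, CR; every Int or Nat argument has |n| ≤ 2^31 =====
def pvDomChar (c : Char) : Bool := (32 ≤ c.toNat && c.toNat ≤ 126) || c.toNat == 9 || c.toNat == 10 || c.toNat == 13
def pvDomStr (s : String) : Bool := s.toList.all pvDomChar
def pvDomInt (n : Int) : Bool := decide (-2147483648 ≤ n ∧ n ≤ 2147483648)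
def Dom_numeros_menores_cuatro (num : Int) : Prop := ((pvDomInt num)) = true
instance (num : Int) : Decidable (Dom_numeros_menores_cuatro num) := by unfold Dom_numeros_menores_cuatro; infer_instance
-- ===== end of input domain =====

-- B: early negative check + iterative digit loop instead of A's recursion through floor-division; simpler, same cost.
-- ===== PORT A =====
def numeros_menores_cuatro (num : Int) : Bool :=
  if num = 0 then true
  else
    if 0 ≤ PySem.Int.mod num 10 ∧ PySem.Int.mod num 10 ≤ 4 then
      numeros_menores_cuatro (PySem.Int.floordiv num 10)
    else false
termination_by num.natAbs
decreasing_by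
  rename_i h0 h1
  rw [PySem.Int.floordiv_eq_ediv_of_pos (by omega)]
  rw [PySem.Int.mod_eq_emod_of_pos (by omega)] at h1
  omega

-- ===== PORT B =====
-- the `while num > 0` loop of Source B
def pvAltLoop (num : Int) : Bool :=
  if num > 0 then
    if PySem.Int.mod num 10 > 4 then false
    else pvAltLoop (PySem.Int.floordiv num 10)
  else true
termination_by num.toNat
decreasing_by
  rename_i h0 _
  rw [PySem.Int.floordiv_eq_ediv_of_pos (by omega)]
  omega

def numeros_menores_cuatro_alt (num : Int) : Bool :=
  if num < 0 then false else pvAltLoop num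

-- ===== PRECONDITION & SPEC =====
def Spec_numeros_menores_cuatro (num : Int) (out : Bool) : Prop := out = numeros_menores_cuatro_alt num
instance (num : Int) (out : Bool) : Decidable (Spec_numeros_menores_cuatro num out) := by unfold Spec_numeros_menores_cuatro; infer_instance

-- ===== CLAIM (what is proved, stated in full; the proofs are below) =====
def Claim_equal_numeros_menores_cuatro : Prop := ∀ (num : Int), Dom_numeros_menores_cuatro num → Spec_numeros_menores_cuatro num (numeros_menores_cuatro num)

-- ===== LEMMAS AND PROOFS =====

-- ===== VERDICT (by name: the statement is the Claim_ definition above) =====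
-- A returns false on every negative input: the floor-division chain ends at -1 whose remainder is 9.
lemma pvA_neg (num : Int) (h : num < 0) : numeros_menores_cuatro num = false := by
  rw [numeros_menores_cuatro]
  rw [PySem.Int.mod_eq_emod_of_pos (by omega), PySem.Int.floordiv_eq_ediv_of_pos (by omega)]
  have h0 : ¬ num = 0 := by omega
  simp only [h0, if_false]
  split
  · rename_i hm
    exact pvA_neg (num / 10) (by omega)
  · rfl
termination_by num.natAbs
decreasing_by omega

-- on nonnegative inputs A agrees with Source B's loop
lemma pvA_nonneg (num : Int) (h : 0 ≤ num) : numeros_menores_cuatro num = pvAltLoop num := by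
  rw [numeros_menores_cuatro, pvAltLoop]
  rw [PySem.Int.mod_eq_emod_of_pos (by omega), PySem.Int.floordiv_eq_ediv_of_pos (by omega)]
  by_cases h0 : num = 0
  · simp [h0]
  · have hp : num > 0 := by omega
    simp only [h0, if_false, hp, if_true]
    have hm : 0 ≤ num % 10 ∧ num % 10 < 10 := by omega
    by_cases h4 : num % 10 ≤ 4
    · simp only [h4, hm.1, and_self, if_true]
      have : ¬ num % 10 > 4 := by omega
      simp only [this, if_false]
      exact pvA_nonneg (num / 10) (by omega)
    · have : num % 10 > 4 := by omega
      simp [h4, this]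
termination_by num.natAbs
decreasing_by omega

-- ===== VERDICT =====
theorem numeros_menores_cuatro_spec : Claim_equal_numeros_menores_cuatro := by
  intro num _
  unfold Spec_numeros_menores_cuatro numeros_menores_cuatro_alt
  by_cases h : num < 0
  · simp [h, pvA_neg num h]
  · simp [h, pvA_nonneg num (by omega)]
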